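-- pv_equiv track=rewrite | github.com/matthewfriedrichs/ComfyUI-ThoughtBubble | commands/command_i.py | _get_item_at_index
-- ===== SOURCE A (Python) =====
-- def _get_item_at_index(weighted_list, index):
--     """
--     Given a weighted list [('a', 2), ('b', 1)] and an index,
--     finds the correct item.
--     Index 0 -> 'a', Index 1 -> 'a', Index 2 -> 'b'
--     """
--     if not weighted_list:
--         return ""
--
--     total_weight = sum(w for t, w in weighted_list)
--     if total_weight == 0:
--         return ""
--
--     # Modulo the index by the total weight to loop
--     target_index = int(index) % total_weight
--
--     current_index = 0
--     for text, weight in weighted_list: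
--         if current_index <= target_index < current_index + weight:
--             return text
--         current_index += weight
--
--     # Fallback (shouldn't be reached, but good for safety)
--     return weighted_list[0][0]
-- ===== SOURCE B (Python) =====
-- def _get_item_at_index(weighted_list, index):
--     if not weighted_list:
--         return ""
--     # Build the cumulative-boundary table and the parallel list of texts.
--     boundaries = []
--     texts = []
--     c = 0
--     for text, weight in weighted_list:
--         c += weight
--         boundaries.append(c)
--         texts.append(text)
--     total_weight = boundaries[-1]
--     if total_weight == 0:
--         return ""
--     target = int(index) % total_weight
--     # Binary search: first boundary strictly greater than target (bisect_right).
--     lo, hi = 0, len(boundaries)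
--     while lo < hi:
--         mid = (lo + hi) // 2
--         if boundaries[mid] <= target:
--             lo = mid + 1
--         else:
--             hi = mid
--     return texts[lo]
-- ===== Notes on version B (the rewrite author's own statement) =====
-- stated objective: alternative
-- what changed: Replaces A's linear accumulator scan with an early return by a two-phase computation: build the prefix-sum boundary table once, then locate the item with a hand-rolled bisect_right binary search over the boundaries.
-- outside the precondition, e.g. on _get_item_at_index([('a', 3), ('b', -2), ('c', 2)], 2): A returns 'a', B returns 'c'; on _get_item_at_index([('a', -2)], 1): A returns 'a', B raises IndexError
import Mathlib
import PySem

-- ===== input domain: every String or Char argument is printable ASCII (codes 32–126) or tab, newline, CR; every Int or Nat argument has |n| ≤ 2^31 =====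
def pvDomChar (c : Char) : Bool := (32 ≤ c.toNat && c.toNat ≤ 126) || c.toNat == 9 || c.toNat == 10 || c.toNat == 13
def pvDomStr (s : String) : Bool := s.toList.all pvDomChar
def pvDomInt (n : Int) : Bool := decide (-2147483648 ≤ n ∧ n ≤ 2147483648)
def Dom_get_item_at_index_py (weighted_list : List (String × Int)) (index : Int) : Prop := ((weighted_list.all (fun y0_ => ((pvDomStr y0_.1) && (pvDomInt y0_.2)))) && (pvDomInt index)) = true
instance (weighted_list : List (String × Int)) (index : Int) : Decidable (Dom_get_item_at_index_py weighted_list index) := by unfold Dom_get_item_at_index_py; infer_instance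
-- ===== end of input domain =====

-- B replaces A's linear accumulator scan with a prefix-sum boundary table plus a
-- bisect_right-style binary search (objective: alternative shape, same result).

-- ===== PORT A =====
-- the for-loop of A with early return: state is the running current_index
def pvALoop : List (String × Int) → Int → Int → Option String
  | [], _, _ => none
  | (text, weight) :: rest, target, cur =>
      if cur ≤ target ∧ target < cur + weight then some text
      else pvALoop rest target (cur + weight)

def get_item_at_index_py (weighted_list : List (String × Int)) (index : Int) : String :=
  match weighted_list with
  | [] => ""
  | (t0, _) :: _ =>
    let total := List.foldl (fun s p => s + p.2) 0 weighted_list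
    if total = 0 then ""
    else
      let target := PySem.Int.mod index total
      -- fallback `weighted_list[0][0]` is t0 (list nonempty in this branch)
      (pvALoop weighted_list target 0).getD t0

-- ===== PORT B =====
-- the build loop of B: returns (boundaries, texts) as accumulated by Source B's for-loop
def pvBuild : List (String × Int) → Int → List Int × List String
  | [], _ => ([], [])
  | (text, weight) :: rest, c =>
      let out := pvBuild rest (c + weight)
      ((c + weight) :: out.1, text :: out.2)

-- the while-loop of B; `bs.getD mid 0` is exact: mid < hi ≤ bs.length on every call
def pvBSearch (bs : List Int) (target : Int) (lo hi : Nat) : Nat :=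
  if h : lo < hi then
    let mid := (lo + hi) / 2
    if bs.getD mid 0 ≤ target then pvBSearch bs target (mid + 1) hi
    else pvBSearch bs target lo mid
  else lo
termination_by hi - lo
decreasing_by all_goals omega

def get_item_at_index_py_alt (weighted_list : List (String × Int)) (index : Int) : String :=
  match weighted_list with
  | [] => ""
  | _ :: _ =>
    let bt := pvBuild weighted_list 0
    let total := PySem.List.pyGetD bt.1 (-1) 0   -- boundaries[-1]; boundaries nonempty here
    if total = 0 then ""
    else
      let target := PySem.Int.mod index total
      let lo := pvBSearch bt.1 target 0 bt.1.length
      PySem.List.pyGetD bt.2 (Int.ofNat lo) ""   -- texts[lo]; in range under Pre_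

-- ===== PRECONDITION & SPEC =====
-- Pre_ excludes lists containing a negative weight: there A still returns a value, but that
-- value is an accident of its accumulator scan over a meaningless weighting, and B's binary
-- search over the (then non-monotonic) boundary table returns a different text or raises IndexError.
def Pre_get_item_at_index_py (weighted_list : List (String × Int)) (index : Int) : Prop :=
  ∀ p ∈ weighted_list, 0 ≤ p.2
instance (weighted_list : List (String × Int)) (index : Int) : Decidable (Pre_get_item_at_index_py weighted_list index) := by unfold Pre_get_item_at_index_py; infer_instance

def pvWitness_get_item_at_index_py : (List (String × Int)) × Int := ([("a", 2), ("b", 1)], 5)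

def Spec_get_item_at_index_py (weighted_list : List (String × Int)) (index : Int) (out : String) : Prop := out = get_item_at_index_py_alt weighted_list index
instance (weighted_list : List (String × Int)) (index : Int) (out : String) : Decidable (Spec_get_item_at_index_py weighted_list index out) := by unfold Spec_get_item_at_index_py; infer_instance

-- ===== CLAIM (what is proved, stated in full; the proofs are below) =====
def Claim_equal_get_item_at_index_py : Prop := ∀ (weighted_list : List (String × Int)) (index : Int), Dom_get_item_at_index_py weighted_list index → Pre_get_item_at_index_py weighted_list index → Spec_get_item_at_index_py weighted_list index (get_item_at_index_py weighted_list index)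

-- ===== LEMMAS AND PROOFS =====

-- texts of pvBuild are the first components
theorem pvBuild_snd (l : List (String × Int)) (c : Int) : (pvBuild l c).2 = l.map Prod.fst := by
  induction l generalizing c with
  | nil => rfl
  | cons p rest ih => cases p; simp [pvBuild, ih]

theorem pvBuild_fst_length (l : List (String × Int)) (c : Int) : (pvBuild l c).1.length = l.length := by
  induction l generalizing c with
  | nil => rfl
  | cons p rest ih => cases p; simp [pvBuild, ih]

-- the last boundary is the total weight (offset by c)
theorem pvBuild_getLast? (l : List (String × Int)) (c : Int) (h : l ≠ []) :
    (pvBuild l c).1.getLast? = some (List.foldl (fun s p => s + p.2) c l) := by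
  induction l generalizing c with
  | nil => exact absurd rfl h
  | cons p rest ih =>
    cases p with
    | mk t w =>
      cases rest with
      | nil => simp [pvBuild, List.foldl]
      | cons q rest' =>
        rw [show (pvBuild ((t, w) :: q :: rest') c).1 = (c + w) :: (pvBuild (q :: rest') (c + w)).1 from rfl,
            List.getLast?_cons, ih (c + w) (by simp)]
        rfl

-- with nonnegative weights every boundary is at least the starting offset
theorem pvBuild_lb (l : List (String × Int)) (c : Int) (hw : ∀ p ∈ l, 0 ≤ p.2) :
    ∀ x ∈ (pvBuild l c).1, c ≤ x := by
  induction l generalizing c with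
  | nil => intro x hx; simp [pvBuild] at hx
  | cons p rest ih =>
    cases p with
    | mk t w =>
      have h0 : (0:Int) ≤ w := hw (t, w) (by simp)
      intro x hx
      simp only [pvBuild, List.mem_cons] at hx
      rcases hx with rfl | hx
      · omega
      · have := ih (c + w) (fun q hq => hw q (by simp [hq])) x hx
        omega

-- and the boundary list is nondecreasing
theorem pvBuild_pairwise (l : List (String × Int)) (c : Int) (hw : ∀ p ∈ l, 0 ≤ p.2) :
    List.Pairwise (· ≤ ·) (pvBuild l c).1 := by
  induction l generalizing c with
  | nil => exact List.Pairwise.nil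
  | cons p rest ih =>
    cases p with
    | mk t w =>
      have hw' : ∀ q ∈ rest, 0 ≤ q.2 := fun q hq => hw q (by simp [hq])
      exact List.Pairwise.cons (pvBuild_lb rest (c + w) hw') (ih (c + w) hw')

-- A's scan resolves to: first index whose boundary exceeds the target
theorem pvALoop_eq_findIdx (l : List (String × Int)) (target c : Int)
    (hw : ∀ p ∈ l, 0 ≤ p.2) (hc : c ≤ target) :
    pvALoop l target c = (pvBuild l c).2[(pvBuild l c).1.findIdx (fun b => decide (target < b))]? := by
  induction l generalizing c with
  | nil => rfl
  | cons p rest ih =>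
    cases p with
    | mk t w =>
      simp only [pvALoop, pvBuild, List.findIdx_cons]
      by_cases hlt : target < c + w
      · simp [hlt, hc]
      · have hle : c + w ≤ target := by omega
        simp only [hlt, decide_false, and_false, if_false, cond_false]
        rw [ih (c + w) (fun q hq => hw q (by simp [hq])) hle]
        simp

-- a position bracketed by the invariants is exactly the findIdx
theorem pvFindIdx_of_bounds (bs : List Int) (target : Int) (lo : Nat) (hlo : lo ≤ bs.length)
    (hlow : ∀ k, (hk : k < bs.length) → k < lo → bs[k] ≤ target)
    (hhigh : ∀ k, (hk : k < bs.length) → lo ≤ k → target < bs[k]) :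
    bs.findIdx (fun b => decide (target < b)) = lo := by
  by_cases h : lo < bs.length
  · rw [List.findIdx_eq h]
    exact ⟨by simpa using hhigh lo h (le_refl _),
      fun j hj => by simpa using not_lt.mpr (hlow j (by omega) hj)⟩
  · have hlen : lo = bs.length := by omega
    rw [hlen]
    simp only [List.findIdx_eq_length]
    intro x hx
    obtain ⟨k, hk, rfl⟩ := List.mem_iff_getElem.mp hx
    simpa using not_lt.mpr (hlow k hk (by omega))

-- the binary search computes that same first index
theorem pvBSearch_eq_findIdx (bs : List Int) (target : Int)
    (hs : List.Pairwise (· ≤ ·) bs) :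
    ∀ n lo hi, hi - lo ≤ n → lo ≤ hi → hi ≤ bs.length →
    (∀ k, (hk : k < bs.length) → k < lo → bs[k] ≤ target) →
    (∀ k, (hk : k < bs.length) → hi ≤ k → target < bs[k]) →
    pvBSearch bs target lo hi = bs.findIdx (fun b => decide (target < b)) := by
  intro n
  induction n with
  | zero =>
    intro lo hi hfuel hlh hhi hlow hhigh
    have hlh' : lo = hi := by omega
    subst hlh'
    rw [pvBSearch]
    simp only [lt_irrefl, dite_false]
    exact (pvFindIdx_of_bounds bs target lo hhi hlow hhigh).symm
  | succ n ih =>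
    intro lo hi hfuel hlh hhi hlow hhigh
    rw [pvBSearch]
    by_cases h : lo < hi
    · simp only [h, dite_true]
      have hmid1 : lo ≤ (lo + hi) / 2 := by omega
      have hmid2 : (lo + hi) / 2 < hi := by omega
      have hmlen : (lo + hi) / 2 < bs.length := by omega
      rw [List.getD_eq_getElem bs 0 hmlen]
      by_cases hcmp : bs[(lo + hi) / 2] ≤ target
      · simp only [hcmp, if_true]
        refine ih ((lo + hi) / 2 + 1) hi (by omega) (by omega) hhi ?_ hhigh
        intro k hk hklt
        rcases Nat.lt_or_ge k ((lo + hi) / 2) with hk2 | hk2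
        · exact le_trans (List.pairwise_iff_getElem.mp hs k ((lo + hi) / 2) hk hmlen hk2) hcmp
        · have : k = (lo + hi) / 2 := by omega
          subst this; exact hcmp
      · simp only [hcmp, if_false]
        refine ih lo ((lo + hi) / 2) (by omega) (by omega) (by omega) hlow ?_
        intro k hk hkge
        rcases Nat.lt_or_ge ((lo + hi) / 2) k with hk2 | hk2
        · exact lt_of_lt_of_le (by omega) (List.pairwise_iff_getElem.mp hs ((lo + hi) / 2) k hmlen hk hk2)
        · have : k = (lo + hi) / 2 := by omega
          subst this; omega
    · have hlh' : lo = hi := by omega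
      subst hlh'
      simp only [h, dite_false]
      exact (pvFindIdx_of_bounds bs target lo hhi hlow hhigh).symm

-- with nonnegative weights, sums only grow
theorem pvSum_ge (l : List (String × Int)) (c : Int) (hw : ∀ p ∈ l, 0 ≤ p.2) :
    c ≤ List.foldl (fun s p => s + p.2) c l := by
  induction l generalizing c with
  | nil => exact le_refl c
  | cons p rest ih =>
    have h0 : (0:Int) ≤ p.2 := hw p (by simp)
    calc c ≤ c + p.2 := by omega
      _ ≤ _ := ih (c + p.2) (fun q hq => hw q (by simp [hq]))

-- ===== VERDICT (by name: the statement is the Claim_ definition above) =====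
theorem get_item_at_index_py_spec : Claim_equal_get_item_at_index_py := by
  intro wl index _ hpre
  unfold Spec_get_item_at_index_py
  cases wl with
  | nil => rfl
  | cons p rest =>
    cases p with
    | mk t0 w0 =>
      set l : List (String × Int) := (t0, w0) :: rest with hl
      have hlne : l ≠ [] := by simp [hl]
      have hbne : (pvBuild l 0).1 ≠ [] := by
        intro hc
        have := pvBuild_fst_length l 0
        rw [hc] at this; simp [hl] at this
      -- the two totals coincide
      have htot : PySem.List.pyGetD (pvBuild l 0).1 (-1) 0 = List.foldl (fun s p => s + p.2) 0 l := by
        rw [PySem.List.pyGetD_neg_one _ _ hbne, List.getLast_eq_iff_getLast?_eq_some]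
        exact pvBuild_getLast? l 0 hlne
      simp only [get_item_at_index_py, get_item_at_index_py_alt, htot]
      set total := List.foldl (fun s p => s + p.2) 0 l with htotdef
      by_cases h0 : total = 0
      · simp only [h0, if_true, hl]
      · simp only [h0, if_false]
        have hpos : 0 < total := lt_of_le_of_ne (pvSum_ge l 0 hpre) (Ne.symm h0)
        set target := PySem.Int.mod index total with htarget
        have ht0 : 0 ≤ target := PySem.Int.mod_nonneg index hpos
        have htlt : target < total := PySem.Int.mod_lt index hpos
        -- the index both sides select
        set r := (pvBuild l 0).1.findIdx (fun b => decide (target < b)) with hr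
        have hrlt : r < (pvBuild l 0).1.length := by
          apply List.findIdx_lt_length_of_exists
          refine ⟨(pvBuild l 0).1.getLast hbne, List.getLast_mem hbne, ?_⟩
          have : (pvBuild l 0).1.getLast hbne = total := by
            rw [List.getLast_eq_iff_getLast?_eq_some]
            exact pvBuild_getLast? l 0 hlne
          simp [this, htlt]
        have hrlt' : r < (pvBuild l 0).2.length := by
          have h2 : (pvBuild l 0).2.length = l.length := by rw [pvBuild_snd]; simp
          have h1 := pvBuild_fst_length l 0
          omega
        -- A's side
        have hA : pvALoop l target 0 = some (pvBuild l 0).2[r] := by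
          rw [pvALoop_eq_findIdx l target 0 hpre ht0, ← hr, List.getElem?_eq_getElem hrlt']
        -- B's side
        have hB : pvBSearch (pvBuild l 0).1 target 0 (pvBuild l 0).1.length = r := by
          exact pvBSearch_eq_findIdx (pvBuild l 0).1 target (pvBuild_pairwise l 0 hpre)
            (pvBuild l 0).1.length 0 (pvBuild l 0).1.length (by omega) (by omega) (le_refl _)
            (fun k hk hk0 => by omega) (fun k hk hkge => by omega)
        rw [hA, hB]
        simp only [Option.getD_some, Int.ofNat_eq_natCast, PySem.List.pyGetD_natCast]
        rw [List.getD_eq_getElem _ _ hrlt']
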